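-- pv_equiv track=rewrite | github.com/ahsas257-glitc/Wash-pro | pages/Tool_8.py | enforce_single_cover
-- ===== SOURCE A (Python) =====
-- from typing import Optional, Dict, Tuple, List
--
-- def enforce_single_cover(selections: Dict[str, str]) -> Dict[str, str]:
--     covers = [u for u, p in selections.items() if p == "Cover Page"]
--     if len(covers) <= 1:
--         return selections
--     keep = covers[-1]
--     for u in covers[:-1]:
--         selections[u] = "Not selected"
--     selections[keep] = "Cover Page"
--     return selections
-- ===== SOURCE B (Python) =====
-- def enforce_single_cover(selections):
--     # Single stateful pass: demote each earlier "Cover Page" as soon as a later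
--     # one is seen; mutates selections in place (same as A) and returns it.
--     prev = None
--     for key, value in list(selections.items()):
--         if value == "Cover Page":
--             if prev is not None:
--                 selections[prev] = "Not selected"
--             prev = key
--     return selections
-- ===== Notes on version B (the rewrite author's own statement) =====
-- stated objective: simpler
-- what changed: Replaced A's two-phase scheme (build a list of all cover keys, then a second loop demoting all but the last plus a final re-insert) by one stateful pass that demotes the previously seen cover key whenever a new one appears.
import Mathlib
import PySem

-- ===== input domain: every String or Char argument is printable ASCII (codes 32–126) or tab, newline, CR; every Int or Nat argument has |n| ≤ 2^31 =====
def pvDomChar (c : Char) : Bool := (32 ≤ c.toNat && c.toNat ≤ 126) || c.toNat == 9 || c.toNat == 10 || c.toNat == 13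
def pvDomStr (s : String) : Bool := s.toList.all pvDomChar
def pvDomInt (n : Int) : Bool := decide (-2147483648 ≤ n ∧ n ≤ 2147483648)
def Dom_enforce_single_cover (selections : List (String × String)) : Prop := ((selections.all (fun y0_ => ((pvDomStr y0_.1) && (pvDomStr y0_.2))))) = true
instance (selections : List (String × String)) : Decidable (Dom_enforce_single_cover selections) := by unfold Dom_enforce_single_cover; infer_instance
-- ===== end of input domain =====

-- B replaces A's two-phase scheme (collect all cover keys, then demote all but the
-- last and re-insert the last) by one stateful pass that demotes the previously seen
-- cover key whenever a new one appears; equally fast, simpler. Both mutate the dict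
-- in place and return the same object in Python.


-- ===== PORT A =====
def enforce_single_cover (selections : List (String × String)) : List (String × String) :=
  let covers := (selections.filter (fun p => p.2 == "Cover Page")).map Prod.fst
  if covers.length ≤ 1 then selections
  else
    match PySem.List.pyGet? covers (-1) with
    | none => selections   -- unreachable: covers.length ≥ 2
    | some keep =>
      let d := (PySem.List.slice covers none (some (-1))).foldl
        (fun d u => d.insert u "Not selected") (PySem.Dict.mk selections)
      (d.insert keep "Cover Page").items

-- ===== PORT B =====
def enforce_single_cover_alt (selections : List (String × String)) : List (String × String) :=
  (selections.foldl
    (fun (st : PySem.Dict String String × Option String) kv =>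
      if kv.2 == "Cover Page" then
        ((match st.2 with
          | some prev => st.1.insert prev "Not selected"
          | none => st.1),
         some kv.1)
      else st)
    (PySem.Dict.mk selections, none)).1.items

-- ===== PRECONDITION & SPEC =====
-- Pre_ requires the association list's keys to be distinct: the Python argument is a
-- dict, which cannot contain duplicate keys, so this excludes no input A actually gets.
def Pre_enforce_single_cover (selections : List (String × String)) : Prop :=
  (selections.map Prod.fst).Nodup
instance (selections : List (String × String)) : Decidable (Pre_enforce_single_cover selections) := by unfold Pre_enforce_single_cover; infer_instance
def pvWitness_enforce_single_cover : (List (String × String)) :=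
  [("a", "Cover Page"), ("b", "Not selected"), ("c", "Cover Page")]

def Spec_enforce_single_cover (selections : List (String × String)) (out : List (String × String)) : Prop := out = enforce_single_cover_alt selections
instance (selections : List (String × String)) (out : List (String × String)) : Decidable (Spec_enforce_single_cover selections out) := by unfold Spec_enforce_single_cover; infer_instance

-- ===== CLAIM (what is proved, stated in full; the proofs are below) =====
def Claim_equal_enforce_single_cover : Prop := ∀ (selections : List (String × String)), Dom_enforce_single_cover selections → Pre_enforce_single_cover selections → Spec_enforce_single_cover selections (enforce_single_cover selections)

-- ===== LEMMAS AND PROOFS =====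

-- the cover keys of a prefix, and the two loop bodies, named for the proofs
def pvCov (l : List (String × String)) : List String :=
  (l.filter (fun p => p.2 == "Cover Page")).map Prod.fst

def pvApp (d : PySem.Dict String String) (us : List String) : PySem.Dict String String :=
  us.foldl (fun d u => d.insert u "Not selected") d

def pvStep (st : PySem.Dict String String × Option String) (kv : String × String) :
    PySem.Dict String String × Option String :=
  if kv.2 == "Cover Page" then
    ((match st.2 with
      | some prev => st.1.insert prev "Not selected"
      | none => st.1),
     some kv.1)
  else st

lemma pvCov_cons (p : String × String) (l : List (String × String)) :
    pvCov (p :: l) = if p.2 == "Cover Page" then p.1 :: pvCov l else pvCov l := by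
  by_cases h : p.2 == "Cover Page" <;> simp [pvCov, h]

lemma pvApp_append (d : PySem.Dict String String) (us vs : List String) :
    pvApp d (us ++ vs) = pvApp (pvApp d us) vs := by
  simp [pvApp, List.foldl_append]

lemma pvB_fold (l : List (String × String)) :
    ∀ (d : PySem.Dict String String) (prev : Option String),
      l.foldl pvStep (d, prev)
        = (pvApp d ((prev.toList ++ pvCov l).dropLast),
           (prev.toList ++ pvCov l).getLast?) := by
  induction l with
  | nil =>
    intro d prev
    cases prev <;> simp [pvCov, pvApp]
  | cons p l ih =>
    intro d prev
    rw [List.foldl_cons, pvCov_cons]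
    by_cases h : p.2 == "Cover Page"
    · have hstep : pvStep (d, prev) p
          = (pvApp d prev.toList, some p.1) := by
        cases prev <;> simp [pvStep, h, pvApp]
      rw [if_pos h, hstep, ih]
      have h1 : (prev.toList ++ p.1 :: pvCov l).dropLast
          = prev.toList ++ (((p.1 : String) :: pvCov l).dropLast) :=
        List.dropLast_append_of_ne_nil (by simp)
      have h2 : (prev.toList ++ p.1 :: pvCov l).getLast?
          = ((p.1 : String) :: pvCov l).getLast? :=
        List.getLast?_append_of_ne_nil _ (by simp)
      rw [h1, h2, pvApp_append]
      simp
    · have hstep : pvStep (d, prev) p = (d, prev) := by simp [pvStep, h]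
      rw [if_neg h, hstep, ih]

lemma pvApp_mk (us : List String) :
    ∀ (sel : List (String × String)), (∀ u ∈ us, u ∈ sel.map Prod.fst) →
      pvApp (PySem.Dict.mk sel) us
        = PySem.Dict.mk (sel.map (fun p => if us.contains p.1 then (p.1, "Not selected") else p)) := by
  induction us with
  | nil => intro sel _; simp [pvApp]
  | cons u us ih =>
    intro sel hmem
    have hc : (PySem.Dict.mk sel).contains u = true := by
      obtain ⟨p, hp, hpu⟩ := List.mem_map.mp (hmem u (by simp))
      simp only [PySem.Dict.contains_mk, List.any_eq_true]
      exact ⟨p, hp, by simp [hpu]⟩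
    have hins : (PySem.Dict.mk sel).insert u "Not selected"
        = PySem.Dict.mk (sel.map (fun p => if p.1 == u then (u, "Not selected") else p)) := by
      apply PySem.Dict.ext
      rw [PySem.Dict.items_insert_of_contains _ _ hc]
    have hkeys : (sel.map (fun p => if p.1 == u then (u, "Not selected") else p)).map Prod.fst
        = sel.map Prod.fst := by
      rw [List.map_map]
      apply List.map_congr_left
      intro p _
      by_cases h : p.1 == u
      · simp [(eq_of_beq h).symm]
      · simp only [beq_iff_eq] at h
        simp [h]
    have : pvApp (PySem.Dict.mk sel) (u :: us)
        = pvApp (PySem.Dict.mk (sel.map (fun p => if p.1 == u then (u, "Not selected") else p))) us := by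
      simp [pvApp, hins]
    rw [this, ih _ (by intro x hx; rw [hkeys]; exact hmem x (by simp [hx]))]
    congr 1
    rw [List.map_map]
    apply List.map_congr_left
    intro p _
    by_cases h : p.1 == u
    · have := eq_of_beq h
      simp [Function.comp, this]
    · simp only [beq_iff_eq] at h
      simp [Function.comp, h]

lemma pvCov_subset_keys (sel : List (String × String)) :
    ∀ u ∈ pvCov sel, u ∈ sel.map Prod.fst := by
  intro u hu
  simp only [pvCov, List.mem_map, List.mem_filter] at hu
  obtain ⟨p, ⟨hp, _⟩, hpu⟩ := hu
  exact List.mem_map.mpr ⟨p, hp, hpu⟩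

lemma pvCov_nodup (sel : List (String × String))
    (h : (sel.map Prod.fst).Nodup) : (pvCov sel).Nodup := by
  have hsub : (pvCov sel).Sublist (sel.map Prod.fst) :=
    List.Sublist.map Prod.fst List.filter_sublist
  exact h.sublist hsub

lemma pvKey_unique (sel : List (String × String))
    (h : (sel.map Prod.fst).Nodup) :
    ∀ p ∈ sel, ∀ q ∈ sel, p.1 = q.1 → p = q := by
  induction sel with
  | nil => simp
  | cons a t ih =>
    simp only [List.map_cons, List.nodup_cons] at h
    intro p hp q hq hpq
    rcases List.mem_cons.mp hp with rfl | hp' <;>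
      rcases List.mem_cons.mp hq with rfl | hq'
    · rfl
    · exact absurd (hpq ▸ List.mem_map.mpr ⟨q, hq', rfl⟩) h.1
    · exact absurd (hpq ▸ List.mem_map.mpr ⟨p, hp', rfl⟩) h.1
    · exact ih h.2 p hp' q hq' hpq

-- ===== VERDICT (by name: the statement is the Claim_ definition above) =====
theorem enforce_single_cover_spec : Claim_equal_enforce_single_cover := by
  intro sel _hdom hpre
  unfold Spec_enforce_single_cover
  -- rewrite B into its map form
  have hB : enforce_single_cover_alt sel
      = ((pvApp (PySem.Dict.mk sel) ((pvCov sel).dropLast))).items := by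
    show (sel.foldl pvStep (PySem.Dict.mk sel, none)).1.items = _
    rw [pvB_fold]
    simp
  have hBmem : ∀ u ∈ (pvCov sel).dropLast, u ∈ sel.map Prod.fst := by
    intro u hu
    exact pvCov_subset_keys sel u ((List.dropLast_sublist _).mem hu)
  have hBmap : enforce_single_cover_alt sel
      = sel.map (fun p => if ((pvCov sel).dropLast).contains p.1 then (p.1, "Not selected") else p) := by
    rw [hB, pvApp_mk _ sel hBmem]
  unfold enforce_single_cover
  show (if (pvCov sel).length ≤ 1 then sel else _) = _
  by_cases hlen : (pvCov sel).length ≤ 1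
  · rw [if_pos hlen, hBmap]
    have : (pvCov sel).dropLast = [] := by
      apply List.eq_nil_of_length_eq_zero
      rw [List.length_dropLast]
      omega
    simp [this]
  · rw [if_neg hlen]
    have hne : pvCov sel ≠ [] := by
      intro h; rw [h] at hlen; simp at hlen
    have hfold : List.map Prod.fst (List.filter (fun p => p.2 == "Cover Page") sel)
        = pvCov sel := rfl
    rw [PySem.List.pyGet?_neg_one, hfold, List.getLast?_eq_some_getLast hne,
        PySem.List.slice_to_neg_one]
    set keep := (pvCov sel).getLast hne with hkeep
    have hkmem : keep ∈ pvCov sel := List.getLast_mem hne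
    have hkkeys : keep ∈ sel.map Prod.fst := pvCov_subset_keys sel keep hkmem
    have hknotdl : keep ∉ (pvCov sel).dropLast := by
      have hnd := pvCov_nodup sel hpre
      have hsplit := List.dropLast_append_getLast hne
      intro hmem
      rw [← hsplit] at hnd
      rcases List.nodup_append.mp hnd with ⟨_, _, hdisj⟩
      exact hdisj keep hmem _ (List.mem_singleton_self _) hkeep
    show ((pvApp (PySem.Dict.mk sel) ((pvCov sel).dropLast)).insert keep "Cover Page").items
        = enforce_single_cover_alt sel
    rw [pvApp_mk _ sel hBmem]
    have hc : (PySem.Dict.mk (sel.map (fun p => if ((pvCov sel).dropLast).contains p.1 then (p.1, "Not selected") else p))).contains keep = true := by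
      simp only [PySem.Dict.contains_mk]
      rw [List.any_eq_true]
      simp only [List.mem_map] at hkkeys
      obtain ⟨p, hp, hpk⟩ := hkkeys
      refine ⟨if ((pvCov sel).dropLast).contains p.1 then (p.1, "Not selected") else p, List.mem_map.mpr ⟨p, hp, rfl⟩, ?_⟩
      simp [hknotdl, hpk]
    rw [PySem.Dict.items_insert_of_contains _ _ hc]
    show (sel.map _).map _ = _
    rw [hBmap, List.map_map]
    apply List.map_congr_left
    intro p hp
    show (if (if ((pvCov sel).dropLast).contains p.1 then (p.1, "Not selected") else p).1 == keep
            then (keep, "Cover Page")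
            else (if ((pvCov sel).dropLast).contains p.1 then (p.1, "Not selected") else p))
        = (if ((pvCov sel).dropLast).contains p.1 then (p.1, "Not selected") else p)
    by_cases hdl : ((pvCov sel).dropLast).contains p.1 = true
    · have hmemdl : p.1 ∈ (pvCov sel).dropLast := by simpa using hdl
      have hk : ¬ ((((p.1 : String), ("Not selected" : String)).1 == keep) = true) := by
        simp only [beq_iff_eq]
        intro he
        exact hknotdl (he ▸ hmemdl)
      rw [if_pos hdl, if_neg hk]
    · rw [if_neg hdl]
      by_cases hk : (p.1 == keep) = true
      · rw [if_pos hk]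
        have hpk : p.1 = keep := eq_of_beq hk
        have hpv : p.2 = "Cover Page" := by
          simp only [pvCov, List.mem_map, List.mem_filter] at hkmem
          obtain ⟨q, ⟨hq, hq2⟩, hqk⟩ := hkmem
          have := pvKey_unique sel hpre p hp q hq (by rw [hpk, ← hqk])
          rw [this]
          exact eq_of_beq hq2
        exact (Prod.ext hpk hpv).symm
      · rw [if_neg hk]
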